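-- pv_equiv track=rewrite | github.com/daniel-reich/turbo-robot | oRwcjPMkyznd2ybRW_2.py | max_product
-- ===== SOURCE A (Python) =====
-- def max_product(n):
--     prod, numb, ans = [], [], []
--     for each in range(1, n + 1):
--         i = 1
--         for num in str(each):
--             i *= int(num)
--         numb.append(each)
--         prod.append(i)
--     for each in range(prod.count(max(prod))):
--         get_index = prod.index(max(prod))
--         ans.append(numb[get_index])
--         prod.remove(max(prod))
--         numb.remove(numb[get_index])
--     return ans
-- ===== SOURCE B (Python) =====
-- def max_product(n):
--     groups = {}
--     for k in range(1, n + 1):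
--         p = 1
--         for ch in str(k):
--             p *= int(ch)
--         groups.setdefault(p, []).append(k)
--     return groups[max(groups)]
-- ===== Notes on version B (the rewrite author's own statement) =====
-- stated objective: simpler
-- what changed: Replaced A's parallel prod/numb lists and the repeated max/index/remove extraction loop by a dict grouping each number under its digit product in one pass, returning the bucket of the maximal key with a single lookup.
import Mathlib
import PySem

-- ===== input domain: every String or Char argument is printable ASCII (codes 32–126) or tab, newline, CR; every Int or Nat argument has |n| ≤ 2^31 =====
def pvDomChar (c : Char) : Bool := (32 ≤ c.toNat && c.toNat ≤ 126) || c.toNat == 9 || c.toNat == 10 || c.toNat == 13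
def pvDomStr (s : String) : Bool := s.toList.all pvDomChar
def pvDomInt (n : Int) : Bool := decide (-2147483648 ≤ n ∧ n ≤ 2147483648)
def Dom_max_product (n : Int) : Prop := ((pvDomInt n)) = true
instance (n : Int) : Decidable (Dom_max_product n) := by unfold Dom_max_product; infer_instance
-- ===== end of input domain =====

-- B replaces A's parallel lists and the repeated max/index/remove extraction loop by a
-- one-pass dict of buckets keyed by digit product, returning the bucket of the maximal key
-- (objective: simpler). Return-value equivalence; neither version mutates its argument.

-- digit product: i = 1; for num in str(k): i *= int(num)   (identical inline loop in both Pythons)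
-- int(num) on a one-char digit string never raises ValueError here, so the .getD 0 is unreachable
def digitProd (k : Int) : Int :=
  (PySem.Int.toStr k).toList.foldl
    (fun i num => i * ((PySem.Int.ofStr? (String.mk [num])).getD 0)) 1

-- ===== PORT A =====
-- second loop of A: for each in range(prod.count(max(prod))): …
-- max(prod) / prod.index / numb[i] / remove never raise while this loop runs, so the .getD defaults are unreachable
def extractLoopA : Nat → List Int → List Int → List Int → List Int
  | 0, _, _, ans => ans
  | c + 1, prod, numb, ans =>
    let m := (PySem.List.max? prod (fun x => x)).getD 0
    let idx := (PySem.List.index? prod m).getD 0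
    let v := PySem.List.pyGetD numb (idx : Int) 0
    extractLoopA c ((PySem.List.remove? prod m).getD prod)
      ((PySem.List.remove? numb v).getD numb) (ans ++ [v])

def max_product (n : Int) : List Int :=
  let st := (PySem.List.pyRange 1 (n + 1) 1).foldl
    (fun (st : List Int × List Int) each =>
      (st.1 ++ [each], st.2 ++ [digitProd each]))  -- numb.append(each); prod.append(i)
    ([], [])
  let numb := st.1
  let prod := st.2
  extractLoopA (PySem.List.count prod ((PySem.List.max? prod (fun x => x)).getD 0)) prod numb []

-- ===== PORT B =====
def max_product_alt (n : Int) : List Int :=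
  let groups := (PySem.List.pyRange 1 (n + 1) 1).foldl
    (fun (d : PySem.Dict Int (List Int)) k =>
      d.modify (digitProd k) [] (· ++ [k]))   -- groups.setdefault(p, []).append(k)
    PySem.Dict.empty
  match PySem.List.max? groups.keys (fun x => x) with
  | none => []                   -- Python: max() on an empty dict raises ValueError (n ≤ 0, outside Pre_)
  | some m => groups.getD m []   -- groups[m]; m is a key, so never a KeyError

-- ===== PRECONDITION & SPEC =====
-- Pre_ excludes exactly n ≤ 0, where both Pythons raise ValueError (max() of an empty sequence).
def Pre_max_product (n : Int) : Prop := 1 ≤ n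
instance (n : Int) : Decidable (Pre_max_product n) := by unfold Pre_max_product; infer_instance
def pvWitness_max_product : Int := 12
def Spec_max_product (n : Int) (out : List Int) : Prop := out = max_product_alt n
instance (n : Int) (out : List Int) : Decidable (Spec_max_product n out) := by unfold Spec_max_product; infer_instance

-- ===== CLAIM (what is proved, stated in full; the proofs are below) =====
def Claim_equal_max_product : Prop := ∀ (n : Int), Dom_max_product n → Pre_max_product n → Spec_max_product n (max_product n)

-- ===== LEMMAS AND PROOFS =====

-- max? with the identity key is some M when M is a member bounding the list
lemma max?_id_eq_some {xs : List Int} {M : Int} (hM : M ∈ xs) (hub : ∀ y ∈ xs, y ≤ M) :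
    PySem.List.max? xs (fun x => x) = some M := by
  cases h : PySem.List.max? xs (fun x => x) with
  | none =>
    rw [PySem.List.max?_eq_none_iff] at h
    subst h; cases hM
  | some m =>
    have h1 := PySem.List.max?_mem h
    have h2 := PySem.List.max?_isMax h M hM
    have h3 := hub m h1
    exact congrArg some (le_antisymm h2 h3).symm

-- the extraction loop yields, in order, the elements of numb whose digit product is M
lemma extractLoopA_filter {M : Int} :
    ∀ (c : Nat) (numb ans : List Int), numb.Nodup →
      c = (numb.map digitProd).count M →
      (∀ x ∈ numb, digitProd x ≤ M) →
      extractLoopA c (numb.map digitProd) numb ans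
        = ans ++ numb.filter (fun x => digitProd x = M) := by
  intro c
  induction c with
  | zero =>
    intro numb ans _ hc _
    have hnm : M ∉ numb.map digitProd := by
      rw [← List.count_eq_zero]; omega
    have hf : numb.filter (fun x => digitProd x = M) = [] := by
      rw [List.filter_eq_nil_iff]
      intro x hx
      simp only [decide_eq_true_eq]
      intro hEq
      exact hnm (by simpa [hEq] using List.mem_map_of_mem (f := digitProd) hx)
    simp [extractLoopA, hf]
  | succ c ih =>
    intro numb ans hnd hc hub
    have hMmem : M ∈ numb.map digitProd := by
      rw [← List.count_pos_iff]; omega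
    have hubm : ∀ y ∈ numb.map digitProd, y ≤ M := by
      intro y hy
      obtain ⟨x, hx, rfl⟩ := List.mem_map.1 hy
      exact hub x hx
    have hmax : PySem.List.max? (numb.map digitProd) (fun x => x) = some M :=
      max?_id_eq_some hMmem hubm
    obtain ⟨k, hidx⟩ : ∃ k, PySem.List.index? (numb.map digitProd) M = some k := by
      cases h : PySem.List.index? (numb.map digitProd) M with
      | none => rw [PySem.List.index?_eq_none_iff] at h; exact absurd hMmem h
      | some k => exact ⟨k, rfl⟩
    obtain ⟨pre, suf, hsplit, hlen, hMnotpre⟩ := (PySem.List.index?_eq_some_iff _ _ _).1 hidx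
    obtain ⟨n1, rest, hn, hpre, hrest⟩ := List.map_eq_append_iff.1 hsplit
    obtain ⟨v, n2, hr, hv, hn2⟩ := List.map_eq_cons_iff.1 hrest
    subst hn hr hpre hn2
    have hvM : digitProd v = M := hv
    have hvnot1 : v ∉ n1 := by
      intro hvin
      exact (List.disjoint_of_nodup_append hnd) hvin (List.mem_cons_self ..)
    have hnoM1 : ∀ x ∈ n1, digitProd x ≠ M := by
      intro x hx hEq
      exact hMnotpre (hEq ▸ List.mem_map_of_mem (f := digitProd) hx)
    have hk : k = n1.length := by rw [List.length_map] at hlen; omega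
    subst hk
    have hget : PySem.List.pyGetD (n1 ++ v :: n2) ((n1.length : Nat) : Int) 0 = v := by
      rw [PySem.List.pyGetD_natCast]
      simp [List.getD]
    have hremP : (PySem.List.remove? ((n1 ++ v :: n2).map digitProd) M).getD ((n1 ++ v :: n2).map digitProd)
        = (n1 ++ n2).map digitProd := by
      rw [PySem.List.remove?_eq_some_erase _ M (by simpa using hMmem)]
      simp only [Option.getD_some]
      rw [List.map_append, List.map_cons, hvM,
        List.erase_append_right _ (by simpa [hvM] using hMnotpre)]
      simp [List.map_append]
    have hremN : (PySem.List.remove? (n1 ++ v :: n2) v).getD (n1 ++ v :: n2) = n1 ++ n2 := by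
      rw [PySem.List.remove?_eq_some_erase _ v (by simp)]
      simp only [Option.getD_some]
      rw [List.erase_append_right _ hvnot1]
      simp
    have hcount : c = ((n1 ++ n2).map digitProd).count M := by
      have h1 : (n1.map digitProd).count M = 0 := by
        rw [List.count_eq_zero]
        intro hmem
        obtain ⟨x, hx, hEq⟩ := List.mem_map.1 hmem
        exact hnoM1 x hx hEq
      simp only [List.map_append, List.map_cons, List.count_append, List.count_cons] at hc ⊢
      simp [hvM, h1] at hc ⊢
      omega
    have hnd' : (n1 ++ n2).Nodup := List.Sublist.nodup (by simp) hnd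
    have hub' : ∀ x ∈ n1 ++ n2, digitProd x ≤ M := by
      intro x hx
      apply hub
      rcases List.mem_append.1 hx with h | h
      · exact List.mem_append.2 (Or.inl h)
      · exact List.mem_append.2 (Or.inr (List.mem_cons_of_mem _ h))
    have step : extractLoopA (c + 1) ((n1 ++ v :: n2).map digitProd) (n1 ++ v :: n2) ans
        = extractLoopA c ((n1 ++ n2).map digitProd) (n1 ++ n2) (ans ++ [v]) := by
      rw [extractLoopA]
      simp only [hmax, Option.getD_some, hidx, hget, hremP, hremN]
    rw [step, ih _ _ hnd' hcount hub']
    have hf1 : n1.filter (fun x => digitProd x = M) = [] := by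
      rw [List.filter_eq_nil_iff]
      intro x hx
      simpa using hnoM1 x hx
    simp [List.filter_append, hf1, hvM]

-- A's first loop builds (numb, prod) = (l, l.map digitProd)
lemma buildA (l : List Int) :
    l.foldl (fun (st : List Int × List Int) each => (st.1 ++ [each], st.2 ++ [digitProd each]))
      (([], []) : List Int × List Int)
      = (l, l.map digitProd) := by
  rw [PySem.List.foldl_prod_mk (f := fun acc each => acc ++ [each])
    (g := fun acc each => acc ++ [digitProd each])]
  rw [PySem.List.foldl_append_singleton_eq_self, PySem.List.foldl_append_singleton_eq_map]
  simp

-- B's dict: looking up any key c gives the elements with digit product c, in order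
lemma bucketB (l : List Int) (c : Int) :
    (l.foldl (fun (d : PySem.Dict Int (List Int)) k => d.modify (digitProd k) [] (· ++ [k]))
      PySem.Dict.empty).getD c []
      = l.filter (fun x => digitProd x = c) := by
  have h : l.foldl (fun (d : PySem.Dict Int (List Int)) k => d.modify (digitProd k) [] (· ++ [k]))
      PySem.Dict.empty
      = (l.map (fun k => ((digitProd k, k) : Int × Int))).foldl
          (fun (d : PySem.Dict Int (List Int)) p => d.modify p.1 [] (· ++ [p.2]))
          PySem.Dict.empty := by
    rw [List.foldl_map]
  rw [h, PySem.Dict.getD_foldl_modify_append]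
  simp [List.filter_map, Function.comp_def, List.map_map]
  exact List.filter_congr (fun x _ => by rw [Bool.eq_iff_iff]; simp)

-- B's dict: its keys are the distinct digit products, in first-occurrence order
lemma keysB (l : List Int) :
    (l.foldl (fun (d : PySem.Dict Int (List Int)) k => d.modify (digitProd k) [] (· ++ [k]))
      PySem.Dict.empty).keys
      = PySem.Set.ofList (l.map digitProd) := by
  rw [PySem.Dict.keys_foldl_modify_key l digitProd [] (fun _ k => (· ++ [k]))]
  exact PySem.Set.update_nil_left _

-- ===== VERDICT (by name: the statement is the Claim_ definition above) =====
theorem max_product_spec : Claim_equal_max_product := by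
  intro n _ hpre
  unfold Spec_max_product max_product max_product_alt
  simp only [buildA, keysB]
  set l := PySem.List.pyRange 1 (n + 1) 1 with hl
  have hn1 : (1 : Int) ≤ n := hpre
  have hlne : l ≠ [] := by
    have : (1 : Int) ∈ l := by
      rw [hl, PySem.List.mem_pyRange_one]
      constructor <;> omega
    intro h; rw [h] at this; cases this
  have hmapne : l.map digitProd ≠ [] := by simpa using hlne
  obtain ⟨M, hM⟩ : ∃ M, PySem.List.max? (l.map digitProd) (fun x => x) = some M := by
    cases h : PySem.List.max? (l.map digitProd) (fun x => x) with
    | none => rw [PySem.List.max?_eq_none_iff] at h; exact absurd h hmapne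
    | some m => exact ⟨m, rfl⟩
  have hMmem : M ∈ l.map digitProd := PySem.List.max?_mem hM
  have hub : ∀ x ∈ l, digitProd x ≤ M := fun x hx =>
    PySem.List.max?_isMax hM (digitProd x) (List.mem_map_of_mem hx)
  -- A's side
  have hA : extractLoopA (PySem.List.count (l.map digitProd) ((PySem.List.max? (l.map digitProd) (fun x => x)).getD 0))
      (l.map digitProd) l [] = l.filter (fun x => digitProd x = M) := by
    rw [hM]
    exact extractLoopA_filter _ l [] (by rw [hl]; exact PySem.List.nodup_pyRange_one 1 (n + 1))
      (by simp [PySem.List.count_eq]) hub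
  -- B's side: the max over the distinct keys is the same M
  have hKmax : PySem.List.max? (PySem.Set.ofList (l.map digitProd)) (fun x => x) = some M := by
    apply max?_id_eq_some
    · exact (PySem.Set.mem_ofList _ _).2 hMmem
    · intro y hy
      obtain ⟨x, hx, rfl⟩ := List.mem_map.1 ((PySem.Set.mem_ofList _ _).1 hy)
      exact hub x hx
  simp only [hA, hKmax, bucketB]
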